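-- pv_equiv track=rewrite | github.com/armank1213/signstream | engine/server.py | simplify_and_tokenize
-- ===== SOURCE A (Python) =====
-- FILLER_WORDS = {
--     "a",
--     "an",
--     "the",
--     "um",
--     "uh",
--     "like",
-- }
--
-- EXTRA_STOP_WORDS = {
--     "is",
--     "am",
--     "are",
--     "was",
--     "were",
--     "be",
--     "been",
--     "being",
--     "to",
--     "of",
--     "and",
--     "or",
--     "but",
-- }
--
-- def simplify_and_tokenize(text: str, level: int) -> list[str]:
--     words = [w.strip(" .,!?\"'()[]{}:;-").lower() for w in text.split()]
--     words = [w for w in words if w]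
--
--     if level >= 1:
--         words = [w for w in words if w not in FILLER_WORDS]
--     if level >= 2:
--         words = [w for w in words if w not in EXTRA_STOP_WORDS]
--
--     return words
-- ===== SOURCE B (Python) =====
-- FILLER_WORDS = {
--     "a", "an", "the", "um", "uh", "like",
-- }
--
-- EXTRA_STOP_WORDS = {
--     "is", "am", "are", "was", "were", "be", "been", "being",
--     "to", "of", "and", "or", "but",
-- }
--
-- _PUNCT = " .,!?\"'()[]{}:;-"
--
--
-- def _emit(buf, removal, out):
--     w = ''.join(buf).strip(_PUNCT).lower()
--     if w and w not in removal:
--         out.append(w)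
--
--
-- def simplify_and_tokenize(text: str, level: int) -> list[str]:
--     removal = set()
--     if level >= 1:
--         removal |= FILLER_WORDS
--     if level >= 2:
--         removal |= EXTRA_STOP_WORDS
--     out = []
--     buf = []
--     for ch in text:
--         if ch.isspace():
--             if buf:
--                 _emit(buf, removal, out)
--                 buf = []
--         else:
--             buf.append(ch)
--     if buf:
--         _emit(buf, removal, out)
--     return out
-- ===== Notes on version B (the rewrite author's own statement) =====
-- stated objective: alternative
-- what changed: Replaces A's split() plus four sequential list comprehensions with an explicit character-level state machine: one scan over the characters with a token buffer that is flushed at whitespace boundaries, each flushed token normalized and tested once against a single precomputed level-dependent removal set.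
import Mathlib
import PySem

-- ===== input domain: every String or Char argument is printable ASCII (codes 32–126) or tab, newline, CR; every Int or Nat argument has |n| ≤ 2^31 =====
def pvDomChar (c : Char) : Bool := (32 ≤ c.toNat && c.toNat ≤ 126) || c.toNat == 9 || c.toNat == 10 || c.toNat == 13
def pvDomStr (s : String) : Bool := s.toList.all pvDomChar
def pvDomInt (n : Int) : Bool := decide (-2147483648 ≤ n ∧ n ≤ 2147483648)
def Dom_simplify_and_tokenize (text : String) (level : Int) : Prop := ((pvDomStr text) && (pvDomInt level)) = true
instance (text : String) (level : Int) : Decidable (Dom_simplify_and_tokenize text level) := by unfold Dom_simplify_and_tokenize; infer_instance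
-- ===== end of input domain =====

-- B replaces A's split() + four sequential comprehensions by a character-level state machine:
-- one scan over the characters with a token buffer, flushed at whitespace boundaries against one
-- precomputed level-dependent removal set (objective: alternative).

-- ===== PORT A =====
def fillerWords : PySem.Set String :=
  PySem.Set.ofList ["a", "an", "the", "um", "uh", "like"]

def extraStopWords : PySem.Set String :=
  PySem.Set.ofList ["is", "am", "are", "was", "were", "be", "been", "being",
                    "to", "of", "and", "or", "but"]

def simplify_and_tokenize (text : String) (level : Int) : List String :=
  let words := (PySem.Str.split₀ text).map
    (fun w => PySem.Str.lower (PySem.Str.stripChars w " .,!?\"'()[]{}:;-"))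
  let words := words.filter (fun w => !(w == ""))
  let words := if 1 ≤ level then words.filter (fun w => !(PySem.Set.contains fillerWords w)) else words
  let words := if 2 ≤ level then words.filter (fun w => !(PySem.Set.contains extraStopWords w)) else words
  words

-- ===== PORT B =====
-- _emit: normalize the buffered token and append it unless empty or removed
def emitB (removal : PySem.Set String) (buf : List Char) (out : List String) : List String :=
  let w := PySem.Str.lower (PySem.Str.stripChars (String.ofList buf) " .,!?\"'()[]{}:;-")
  if !(w == "") && !(PySem.Set.contains removal w) then out ++ [w] else out

-- the character-level state machine: buf is the current token's characters, out the result so far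
def scanB (removal : PySem.Set String) : List Char → List Char → List String → List String
  | [], buf, out => if buf.isEmpty then out else emitB removal buf out
  | c :: rest, buf, out =>
      if PySem.Chars.isspace c then
        if buf.isEmpty then scanB removal rest [] out
        else scanB removal rest [] (emitB removal buf out)
      else scanB removal rest (buf ++ [c]) out

def simplify_and_tokenize_alt (text : String) (level : Int) : List String :=
  let removal : PySem.Set String := PySem.Set.empty
  let removal := if 1 ≤ level then PySem.Set.union removal fillerWords else removal
  let removal := if 2 ≤ level then PySem.Set.union removal extraStopWords else removal
  scanB removal text.toList [] []

-- ===== PRECONDITION & SPEC =====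
def Spec_simplify_and_tokenize (text : String) (level : Int) (out : List String) : Prop := out = simplify_and_tokenize_alt text level
instance (text : String) (level : Int) (out : List String) : Decidable (Spec_simplify_and_tokenize text level out) := by unfold Spec_simplify_and_tokenize; infer_instance

-- ===== CLAIM (what is proved, stated in full; the proofs are below) =====
def Claim_equal_simplify_and_tokenize : Prop := ∀ (text : String) (level : Int), Dom_simplify_and_tokenize text level → Spec_simplify_and_tokenize text level (simplify_and_tokenize text level)

-- ===== LEMMAS AND PROOFS =====

-- A's token normalization, as a function of the token's character list
def normTok (t : List Char) : String :=
  PySem.Str.lower (PySem.Str.stripChars (String.ofList t) " .,!?\"'()[]{}:;-")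

-- split₀.go distributes over its accumulator
theorem go_acc (cs : List Char) : ∀ cur acc,
    PySem.Chars.split₀.go cs cur acc = acc.reverse ++ PySem.Chars.split₀.go cs cur [] := by
  induction cs with
  | nil => intro cur acc; simp [PySem.Chars.split₀.go]; split_ifs <;> simp
  | cons c rest ih =>
    intro cur acc
    simp only [PySem.Chars.split₀.go]
    split_ifs with h1 h2
    · exact ih [] acc
    · rw [ih [] (cur.reverse :: acc), ih [] [cur.reverse]]; simp
    · exact ih (c :: cur) acc

-- flushing the buffer is filtering the singleton of its normalized token
theorem emit_filter (R : PySem.Set String) (buf : List Char) (out : List String) :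
    emitB R buf out = out ++
      List.filter (fun w => !(w == "") && !(PySem.Set.contains R w)) [normTok buf] := by
  unfold emitB normTok
  simp only [List.filter_cons, List.filter_nil]
  split_ifs <;> simp_all

-- the scanner equals: split into tokens, normalize each, filter by the removal set
theorem scan_eq (R : PySem.Set String) (cs : List Char) : ∀ buf out,
    scanB R cs buf out = out ++
      ((PySem.Chars.split₀.go cs buf.reverse []).map normTok).filter
        (fun w => !(w == "") && !(PySem.Set.contains R w)) := by
  induction cs with
  | nil =>
    intro buf out
    by_cases hb : buf.isEmpty
    · have hb' : buf = [] := List.isEmpty_iff.mp hb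
      subst hb'
      simp [scanB, PySem.Chars.split₀.go]
    · simp only [scanB, PySem.Chars.split₀.go, List.isEmpty_reverse]
      rw [if_neg hb, if_neg hb]
      simp only [List.reverse_cons, List.reverse_nil, List.nil_append, List.reverse_reverse,
        List.map_cons, List.map_nil]
      exact emit_filter R buf out
  | cons c rest ih =>
    intro buf out
    by_cases hs : PySem.Chars.isspace c
    · by_cases hb : buf.isEmpty
      · have hb' : buf = [] := List.isEmpty_iff.mp hb
        subst hb'
        simp only [scanB, PySem.Chars.split₀.go, hs, if_true, List.reverse_nil,
          List.isEmpty_nil]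
        exact ih [] out
      · simp only [scanB, PySem.Chars.split₀.go, hs, if_true, List.isEmpty_reverse]
        rw [if_neg hb, if_neg hb]
        rw [ih [] (emitB R buf out), go_acc rest [] [buf.reverse.reverse], emit_filter]
        simp only [List.reverse_cons, List.reverse_nil, List.nil_append, List.reverse_reverse,
          List.append_assoc, List.filter_cons]
        split_ifs <;> simp_all [PySem.Set.contains]
    · simp only [scanB, PySem.Chars.split₀.go, hs, Bool.false_eq_true, if_false]
      rw [ih (buf ++ [c]) out]
      simp

-- ===== VERDICT (by name: the statement is the Claim_ definition above) =====
theorem simplify_and_tokenize_spec : Claim_equal_simplify_and_tokenize := by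
  unfold Claim_equal_simplify_and_tokenize
  intro text level _
  unfold Spec_simplify_and_tokenize simplify_and_tokenize simplify_and_tokenize_alt
  rw [scan_eq]
  have hsplit : PySem.Chars.split₀.go text.toList [] [] = (PySem.Str.split₀ text).map String.toList := by
    have h0 : PySem.Chars.split₀.go text.toList [] [] = PySem.Chars.split₀ text.toList := rfl
    rw [h0, ← PySem.Str.split₀_map_toList]
  simp only [List.reverse_nil, hsplit, List.map_map, List.nil_append]
  have hnorm : (normTok ∘ String.toList) = (fun w => PySem.Str.lower (PySem.Str.stripChars w " .,!?\"'()[]{}:;-")) := by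
    funext w
    have hmk : String.ofList w.toList = w := String.ofList_toList
    simp [normTok, hmk]
  rw [hnorm]
  by_cases h2 : 2 ≤ level
  · have h1 : 1 ≤ level := by omega
    have hR : PySem.Set.union (PySem.Set.union PySem.Set.empty fillerWords) extraStopWords
        = fillerWords ++ extraStopWords := by decide
    simp only [h1, h2, if_pos, hR]
    rw [List.filter_filter, List.filter_filter]
    apply List.filter_congr
    intro w _
    simp only [PySem.Set.contains_eq_listContains, List.contains_append, Bool.not_or, Bool.and_assoc]
    cases (w == "") <;> cases (List.contains fillerWords w) <;> cases (List.contains extraStopWords w) <;> rfl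
  · by_cases h1 : 1 ≤ level
    · have hR : PySem.Set.union PySem.Set.empty fillerWords = fillerWords := by decide
      simp only [h1, h2, if_pos, if_neg, not_false_iff, hR]
      rw [List.filter_filter]
      apply List.filter_congr
      intro w _
      cases (w == "") <;> cases (fillerWords.contains w) <;> rfl
    · simp only [h1, h2, if_neg, not_false_iff]
      apply List.filter_congr
      intro w _
      simp [PySem.Set.empty, PySem.Set.contains_eq_listContains]
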